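-- pv_equiv track=rewrite | github.com/INFORMSJoC/2024.0719 | src/bental_polyhedral_1.py | index_xi
-- ===== SOURCE A (Python) =====
-- def index_xi(theta, v, l, i, j):
--     begin_index = 2*(2**theta) - 1
--     for l_index in range(1, l):
--         for i_index in range(1, 2**(theta-l_index)+1):
--             begin_index += 2*v[l_index-1] + 2
--     for i_index in range(1, i):
--         begin_index += 2*v[l-1] + 2
--     return begin_index + j
-- ===== SOURCE B (Python) =====
-- def index_xi(theta, v, l, i, j):
--     # closed-form: replace each constant-increment inner loop by count * value
--     total = 2 * 2**theta - 1 + j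
--     for k in range(1, l):
--         total += (2*v[k-1] + 2) * 2**(theta - k)
--     if i > 1:
--         total += (i - 1) * (2*v[l-1] + 2)
--     return total
-- ===== Notes on version B (the rewrite author's own statement) =====
-- stated objective: faster
-- what changed: the 2^(theta-k)-iteration inner loop and the (i-1)-iteration second loop, each adding a constant, are replaced by single count*value multiplications, leaving one O(l) pass; intended as faster (timing: 4.28x at the largest size both finished, A timed out at n=64 where B returned)
-- outside the precondition, e.g. on index_xi(-1, [], 1, 1, 0): A returns 0.0, B returns 0.0
import Mathlib
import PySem

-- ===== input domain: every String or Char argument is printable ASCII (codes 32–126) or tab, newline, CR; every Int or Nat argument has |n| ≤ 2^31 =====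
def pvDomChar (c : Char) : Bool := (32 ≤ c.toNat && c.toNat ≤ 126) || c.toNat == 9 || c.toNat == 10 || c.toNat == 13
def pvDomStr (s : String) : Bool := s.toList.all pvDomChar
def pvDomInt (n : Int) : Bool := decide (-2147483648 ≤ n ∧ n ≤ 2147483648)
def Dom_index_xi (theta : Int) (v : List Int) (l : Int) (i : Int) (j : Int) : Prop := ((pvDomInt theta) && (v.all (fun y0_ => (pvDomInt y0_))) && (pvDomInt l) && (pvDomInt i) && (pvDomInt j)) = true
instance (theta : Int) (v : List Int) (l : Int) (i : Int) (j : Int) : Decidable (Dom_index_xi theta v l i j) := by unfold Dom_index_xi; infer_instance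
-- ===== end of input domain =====

-- B replaces A's constant-increment loops (the inner one runs 2^(theta-k) times) by count*value
-- products, one O(l) pass; intended as faster (timing: 4.28x at the largest size both finished,
-- A timed out at n=64 where B returned).

-- ===== PORT A =====
-- literal transliteration of A: nested counting loops, each iteration adds 2*v[..]+2
def index_xi (theta : Int) (v : List Int) (l : Int) (i : Int) (j : Int) : Int :=
  let b1 :=
    (PySem.List.pyRange 1 l 1).foldl (fun b l_index =>
      (PySem.List.pyRange 1 ((2 : Int) ^ (theta - l_index).toNat + 1) 1).foldl
        (fun b _ => b + (2 * PySem.List.pyGetD v (l_index - 1) 0 + 2)) b)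
      (2 * (2 : Int) ^ theta.toNat - 1)
  let b2 :=
    (PySem.List.pyRange 1 i 1).foldl (fun b _ => b + (2 * PySem.List.pyGetD v (l - 1) 0 + 2)) b1
  b2 + j

-- ===== PORT B =====
-- transliteration of Source B: one O(l) loop of count*value products, then a single multiplication
def index_xi_alt (theta : Int) (v : List Int) (l : Int) (i : Int) (j : Int) : Int :=
  let t1 :=
    (PySem.List.pyRange 1 l 1).foldl
      (fun t k => t + (2 * PySem.List.pyGetD v (k - 1) 0 + 2) * (2 : Int) ^ (theta - k).toNat)
      (2 * (2 : Int) ^ theta.toNat - 1 + j)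
  if 1 < i then t1 + (i - 1) * (2 * PySem.List.pyGetD v (l - 1) 0 + 2) else t1

-- ===== PRECONDITION & SPEC =====
-- Pre_ excludes exactly the inputs where Python A leaves the Int type or raises: theta < 0 makes
-- 2**theta a float (A returns a float), theta < l-1 with l >= 2 makes range(1, 2**(theta-k)+1)
-- a range over a float (TypeError), len(v) < l-1 with l >= 2 is an IndexError, and with i >= 2
-- the index l-1 must be a valid (possibly negative, Python-wrapping) index into v.
def Pre_index_xi (theta : Int) (v : List Int) (l : Int) (i : Int) (j : Int) : Prop :=
  0 ≤ theta ∧ (2 ≤ l → l - 1 ≤ theta ∧ l - 1 ≤ (v.length : Int)) ∧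
  (2 ≤ i → -(v.length : Int) ≤ l - 1 ∧ l - 1 < (v.length : Int))
instance (theta : Int) (v : List Int) (l : Int) (i : Int) (j : Int) : Decidable (Pre_index_xi theta v l i j) := by unfold Pre_index_xi; infer_instance

def pvWitness_index_xi : Int × List Int × Int × Int × Int := (2, [3, 4], 2, 2, 1)

def Spec_index_xi (theta : Int) (v : List Int) (l : Int) (i : Int) (j : Int) (out : Int) : Prop := out = index_xi_alt theta v l i j
instance (theta : Int) (v : List Int) (l : Int) (i : Int) (j : Int) (out : Int) : Decidable (Spec_index_xi theta v l i j out) := by unfold Spec_index_xi; infer_instance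

-- ===== CLAIM (what is proved, stated in full; the proofs are below) =====
def Claim_equal_index_xi : Prop := ∀ (theta : Int) (v : List Int) (l : Int) (i : Int) (j : Int), Dom_index_xi theta v l i j → Pre_index_xi theta v l i j → Spec_index_xi theta v l i j (index_xi theta v l i j)

-- ===== LEMMAS AND PROOFS =====

-- a fold that adds a constant c on every step equals init + length * c
theorem foldl_const_add (xs : List Int) (b c : Int) :
    xs.foldl (fun b _ => b + c) b = b + xs.length * c := by
  induction xs generalizing b with
  | nil => simp
  | cons x xs ih => simp [List.foldl, ih]; ring

theorem witness_ok : Dom_index_xi pvWitness_index_xi.1 pvWitness_index_xi.2.1 pvWitness_index_xi.2.2.1 pvWitness_index_xi.2.2.2.1 pvWitness_index_xi.2.2.2.2 ∧ Pre_index_xi pvWitness_index_xi.1 pvWitness_index_xi.2.1 pvWitness_index_xi.2.2.1 pvWitness_index_xi.2.2.2.1 pvWitness_index_xi.2.2.2.2 := by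
  decide

-- ===== VERDICT (by name: the statement is the Claim_ definition above) =====
theorem index_xi_spec : Claim_equal_index_xi := by
  intro theta v l i j _ _
  unfold Spec_index_xi index_xi index_xi_alt
  dsimp only
  -- A's inner fold adds its constant 2^(theta-k) times
  have hinner : ∀ (k b : Int),
      (PySem.List.pyRange 1 ((2 : Int) ^ (theta - k).toNat + 1) 1).foldl
        (fun b _ => b + (2 * PySem.List.pyGetD v (k - 1) 0 + 2)) b
      = b + (2 * PySem.List.pyGetD v (k - 1) 0 + 2) * (2 : Int) ^ (theta - k).toNat := by
    intro k b
    rw [foldl_const_add, PySem.List.length_pyRange_one]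
    have h2 : (0 : Int) ≤ (2 : Int) ^ (theta - k).toNat := by positivity
    have : (((2 : Int) ^ (theta - k).toNat + 1 - 1).toNat : Int) = (2 : Int) ^ (theta - k).toNat := by
      omega
    rw [this]; ring
  have houter := PySem.List.foldl_congr_mem
    (l := PySem.List.pyRange 1 l 1)
    (init := 2 * (2 : Int) ^ theta.toNat - 1)
    (f := fun b l_index =>
      (PySem.List.pyRange 1 ((2 : Int) ^ (theta - l_index).toNat + 1) 1).foldl
        (fun b _ => b + (2 * PySem.List.pyGetD v (l_index - 1) 0 + 2)) b)
    (g := fun t k => t + (2 * PySem.List.pyGetD v (k - 1) 0 + 2) * (2 : Int) ^ (theta - k).toNat)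
    (fun b k _ => hinner k b)
  rw [houter, foldl_const_add, PySem.List.length_pyRange_one]
  -- the two outer folds differ only in the init (+ j), which shifts through
  have hshift : ∀ (xs : List Int) (b d : Int),
      xs.foldl (fun t k => t + (2 * PySem.List.pyGetD v (k - 1) 0 + 2) * (2 : Int) ^ (theta - k).toNat) (b + d)
      = xs.foldl (fun t k => t + (2 * PySem.List.pyGetD v (k - 1) 0 + 2) * (2 : Int) ^ (theta - k).toNat) b + d := by
    intro xs
    induction xs with
    | nil => intro b d; simp
    | cons x xs ih =>
      intro b d
      simp only [List.foldl]
      rw [show b + d + (2 * PySem.List.pyGetD v (x - 1) 0 + 2) * (2 : Int) ^ (theta - x).toNat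
            = b + (2 * PySem.List.pyGetD v (x - 1) 0 + 2) * (2 : Int) ^ (theta - x).toNat + d by ring,
          ih]
  rw [hshift]
  set S := (PySem.List.pyRange 1 l 1).foldl
      (fun t k => t + (2 * PySem.List.pyGetD v (k - 1) 0 + 2) * (2 : Int) ^ (theta - k).toNat)
      (2 * (2 : Int) ^ theta.toNat - 1) with hS
  by_cases hi : 1 < i
  · have : (((i : Int) - 1).toNat : Int) = i - 1 := by omega
    rw [this, if_pos hi]; ring
  · have : ((i : Int) - 1).toNat = 0 := by omega
    rw [this, if_neg hi]; push_cast; ring
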